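-- pv_equiv track=rewrite | github.com/MrBrantCode/unitest_baseline | mut_generate/mist_train_taco/taco_2761/solution.py | compress_shiritori
-- ===== SOURCE A (Python) =====
-- def compress_shiritori(words):
--     from collections import deque
--
--     def ctoi(c):
--         return ord(c) - ord('a')
--
--     N = len(words)
--     idxs = [deque() for _ in range(26)]
--     cs = []
--
--     for i in range(N):
--         c = words[i][0]
--         cs.append(c)
--         ci = ctoi(c)
--         idxs[ci].append(i)
--
--     dp = [i for i in range(N)]
--     dp[0] = 0
--
--     for i in range(N):
--         c = cs[i]
--         ci = ctoi(c)
--         if i > 0: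
--             dp[i] = min(dp[i], dp[i - 1] + 1)
--         if len(idxs[ci]) < 2:
--             continue
--         idxs[ci].popleft()
--         pi = idxs[ci][0]
--         dp[pi] = dp[i]
--
--     return dp[-1] + 1
-- ===== SOURCE B (Python) =====
-- def compress_shiritori(words):
--     # single streaming pass: prev = dp of previous word, last[b] = dp value at the
--     # most recent earlier word whose first letter lands in bucket b
--     last = [None] * 26
--     for i, w in enumerate(words):
--         ci = ord(w[0]) - ord('a')
--         cur = prev + 1 if i else 0
--         L = last[ci]
--         if L is not None and L < cur:
--             cur = L
--         last[ci] = cur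
--         prev = cur
--     return prev + 1
-- ===== Notes on version B (the rewrite author's own statement) =====
-- stated objective: faster
-- what changed: B replaces A's two passes (building 26 per-letter deques of occurrence indices plus a dp array that is written forward into the future) by a single streaming pass keeping only a scalar prev = dp of the previous word and a 26-slot array of the dp value at the most recent word of each letter bucket; the dp array, the index-building pass and the deques disappear. Measured constant-factor speedup (one pass, no deque/dp-array allocation).
import Mathlib
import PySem

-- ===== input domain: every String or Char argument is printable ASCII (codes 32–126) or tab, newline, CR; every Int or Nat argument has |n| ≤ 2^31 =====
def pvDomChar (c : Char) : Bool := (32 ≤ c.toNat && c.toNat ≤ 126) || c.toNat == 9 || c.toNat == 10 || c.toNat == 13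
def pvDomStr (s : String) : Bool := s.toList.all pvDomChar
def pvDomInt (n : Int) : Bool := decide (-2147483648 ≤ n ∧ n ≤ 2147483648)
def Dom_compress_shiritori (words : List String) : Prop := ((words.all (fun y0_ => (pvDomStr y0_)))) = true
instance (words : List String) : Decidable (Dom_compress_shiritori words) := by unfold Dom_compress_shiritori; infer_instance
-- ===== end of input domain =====

-- B: one streaming pass (scalar prev + 26-slot last-dp array) replacing A's deque-index pass plus dp array; return values proved equal on Pre_ (both raise outside it).


-- ===== PORT A =====
-- first loop body: c = words[i][0]; cs.append(c); idxs[ctoi(c)].append(i)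
def pvStepA1 (words : List String) (st : List (List Int) × List Char) (i : Int) :
    List (List Int) × List Char :=
  let c : Char := (PySem.Str.pyGet? (PySem.List.pyGetD words i "") 0).getD 'a'
  let cs := st.2 ++ [c]
  let ci : Int := (c.toNat : Int) - 97
  let idxs := PySem.List.pySetD st.1 ci (PySem.List.pyGetD st.1 ci [] ++ [i])
  (idxs, cs)

-- second loop body: dp[i]=min(dp[i],dp[i-1]+1); if ≥2 queued: popleft, dp[pi]=dp[i]
def pvStepA2 (cs : List Char) (st : List Int × List (List Int)) (i : Int) :
    List Int × List (List Int) :=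
  let c : Char := PySem.List.pyGetD cs i 'a'
  let ci : Int := (c.toNat : Int) - 97
  let dp := if 0 < i then
      PySem.List.pySetD st.1 i
        (min (PySem.List.pyGetD st.1 i 0) (PySem.List.pyGetD st.1 (i - 1) 0 + 1))
    else st.1
  let q := PySem.List.pyGetD st.2 ci []
  if q.length < 2 then (dp, st.2)
  else
    let q2 := q.tail
    let idxs := PySem.List.pySetD st.2 ci q2
    let pi := PySem.List.pyGetD q2 0 0
    (PySem.List.pySetD dp pi (PySem.List.pyGetD dp i 0), idxs)

def compress_shiritori (words : List String) : Int :=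
  let N : Int := PySem.List.len words
  let built := (PySem.List.pyRange 0 N 1).foldl (pvStepA1 words)
    (List.replicate 26 ([] : List Int), ([] : List Char))
  let dp0 := PySem.List.pySetD (PySem.List.pyRange 0 N 1) 0 0
  let fin := (PySem.List.pyRange 0 N 1).foldl (pvStepA2 built.2) (dp0, built.1)
  PySem.List.pyGetD fin.1 (-1) 0 + 1

-- ===== PORT B =====
-- loop body of B: cur = prev+1 (0 for the first word), improved by last[ord(w[0])-97].
-- In Source B prev is unbound before the loop (it is never read at i = 0); the port carries 0
-- as the dummy initial value of that never-read slot.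
def pvStepB (st : List (Option Int) × Int) (p : Int × String) : List (Option Int) × Int :=
  let ci : Int := (((PySem.Str.pyGet? p.2 0).getD 'a').toNat : Int) - 97
  let cur0 : Int := if p.1 ≠ 0 then st.2 + 1 else 0
  let cur : Int := (PySem.List.pyGetD st.1 ci none).elim cur0
    (fun l => if l < cur0 then l else cur0)
  (PySem.List.pySetD st.1 ci (some cur), cur)

def compress_shiritori_alt (words : List String) : Int :=
  let fin := (PySem.List.enumerate words).foldl pvStepB
    (List.replicate 26 (none : Option Int), (0 : Int))
  fin.2 + 1

-- ===== PRECONDITION & SPEC =====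
-- Pre_ excludes exactly the inputs on which A raises (and B raises too): the empty list
-- (A: dp[0]=0 is an IndexError on an empty dp; B: prev unbound), empty words (words[i][0])
-- and words whose first character has ord(c)-97 outside [-26,25] (IndexError on the 26-slot list).
def Pre_compress_shiritori (words : List String) : Prop :=
  words ≠ [] ∧
  (words.all (fun w =>
    match w.toList with
    | [] => false
    | c :: _ => decide (71 ≤ c.toNat ∧ c.toNat ≤ 122))) = true
instance (words : List String) : Decidable (Pre_compress_shiritori words) := by
  unfold Pre_compress_shiritori; infer_instance

def pvWitness_compress_shiritori : List String := ["apple", "zebra", "ant"]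

def Spec_compress_shiritori (words : List String) (out : Int) : Prop :=
  out = compress_shiritori_alt words
instance (words : List String) (out : Int) : Decidable (Spec_compress_shiritori words out) := by
  unfold Spec_compress_shiritori; infer_instance

-- ===== CLAIM (what is proved, stated in full; the proofs are below) =====
def Claim_equal_compress_shiritori : Prop := ∀ (words : List String), Dom_compress_shiritori words → Pre_compress_shiritori words → Spec_compress_shiritori words (compress_shiritori words)

-- ===== LEMMAS AND PROOFS =====

-- first character of words[j] (defaults are irrelevant under Pre_)
def pvFC (words : List String) (j : Nat) : Char := (words.getD j "").toList.headD 'A'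

-- the bucket Python's 26-slot indexing by ord(c)-97 (with wraparound) selects
def pvBkt (w : String) : Nat := ((w.toList.headD 'A').toNat - 71) % 26

-- occurrence indices of bucket b among positions [0, k)
def pvPref (bs : List Nat) (k b : Nat) : List Nat :=
  (List.range k).filter (fun j => decide (bs.getD j 26 = b))

-- occurrence indices of bucket b among positions [k, bs.length)
def pvOcc (bs : List Nat) (k b : Nat) : List Nat :=
  (List.range' k (bs.length - k)).filter (fun j => decide (bs.getD j 26 = b))

-- most recent occurrence of bucket b before position k
def pvLastOcc (bs : List Nat) (k b : Nat) : Option Nat := (pvPref bs k b).getLast?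

-- table of the dp values of the first k words (the recurrence both programs compute)
def pvFdpL (bs : List Nat) : Nat → List Int
  | 0 => []
  | k + 1 =>
    let prev := pvFdpL bs k
    let v : Int :=
      if k = 0 then 0 else
        (pvLastOcc bs k (bs.getD k 26)).elim (prev.getD (k - 1) 0 + 1)
          (fun j => min (prev.getD (k - 1) 0 + 1) (prev.getD j 0))
    prev ++ [v]

-- dp value of word k
def pvFdp (bs : List Nat) (k : Nat) : Int := (pvFdpL bs (k + 1)).getD k 0

-- the value A's dp array holds at slot j after k iterations of the second loop
def pvDpVal (bs : List Nat) (k j : Nat) : Int :=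
  if j < k then pvFdp bs j
  else
    (pvLastOcc bs k (bs.getD j 26)).elim (j : Int)
      (fun j' => if (pvOcc bs k (bs.getD j 26)).head? = some j then pvFdp bs j' else (j : Int))

-- state of A's second loop after k iterations
def pvS2 (words : List String) (k : Nat) : List Int × List (List Int) :=
  (PySem.List.pyRange 0 (k : Int) 1).foldl
    (pvStepA2 ((List.range words.length).map (pvFC words)))
    (PySem.List.pySetD (PySem.List.pyRange 0 (words.length : Int) 1) 0 0,
     (List.range 26).map (fun b => (pvOcc (words.map pvBkt) 0 b).map (fun j : Nat => (j : Int))))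

lemma pvPre_facts (words : List String) (h : Pre_compress_shiritori words) (j : Nat)
    (hj : j < words.length) :
    (words.getD j "").toList ≠ [] ∧ 71 ≤ (pvFC words j).toNat ∧ (pvFC words j).toNat ≤ 122 := by
  obtain ⟨-, hall⟩ := h
  rw [List.all_eq_true] at hall
  have hmem : words.getD j "" ∈ words := by
    rw [List.getD_eq_getElem _ _ hj]; exact List.getElem_mem hj
  have hthis := hall _ hmem
  cases hcl : (words.getD j "").toList with
  | nil => rw [hcl] at hthis; simp at hthis
  | cons c t =>
    rw [hcl] at hthis
    simp only [decide_eq_true_eq] at hthis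
    have hfc : pvFC words j = c := by unfold pvFC; rw [hcl]; rfl
    refine ⟨by simp [hcl], ?_, ?_⟩ <;> rw [hfc] <;> omega

lemma pvBs_getD (words : List String) (j : Nat) (hj : j < words.length) :
    (words.map pvBkt).getD j 26 = ((pvFC words j).toNat - 71) % 26 := by
  have h1 : (words.map pvBkt).getD j 26 = pvBkt (words.getD j "") := by
    rw [List.getD_eq_getElem _ _ (by simpa using hj), List.getElem_map]
    congr 1
    rw [List.getD_eq_getElem _ _ hj]
  rw [h1]
  rfl

-- resolution of Python's 26-slot indexing by ord(c)-97
lemma pvIdx26 (t : Nat) (h1 : 71 ≤ t) (h2 : t ≤ 122) :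
    PySem.List.pyIdx? 26 ((t : Int) - 97) = some ((t - 71) % 26) := by
  unfold PySem.List.pyIdx?
  rcases Nat.lt_or_ge t 97 with h | h
  · rw [if_neg (by omega), if_pos (by push_cast; omega)]
    congr 1; omega
  · rw [if_pos (by omega), if_pos (by push_cast; omega)]
    congr 1; omega

lemma pvGetD26 {α : Type} (l : List α) (hl : l.length = 26) (t : Nat) (h1 : 71 ≤ t)
    (h2 : t ≤ 122) (d : α) :
    PySem.List.pyGetD l ((t : Int) - 97) d = l.getD ((t - 71) % 26) d := by
  rcases Nat.lt_or_ge t 97 with h | h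
  · have e : (t : Int) - 97 = -(((97 - t : Nat) : Int)) := by push_cast; omega
    rw [e, PySem.List.pyGetD_neg_natCast l _ d (by omega) (by omega)]
    rw [← List.getD_eq_getElem l d (show l.length - (97 - t) < l.length by omega)]
    congr 1; omega
  · have e : (t : Int) - 97 = ((t - 97 : Nat) : Int) := by push_cast; omega
    rw [e, PySem.List.pyGetD_natCast]
    congr 1; omega

lemma pvSetD26 {α : Type} (l : List α) (hl : l.length = 26) (t : Nat) (h1 : 71 ≤ t)
    (h2 : t ≤ 122) (v : α) :
    PySem.List.pySetD l ((t : Int) - 97) v = l.set ((t - 71) % 26) v := by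
  simp only [PySem.List.pySetD, PySem.List.pySet?, hl, pvIdx26 t h1 h2, Option.map_some,
    Option.getD_some]

lemma pvSetMapRange {α : Type} (n : Nat) (g g' : Nat → α) (i : Nat) (v : α) (hi : i < n)
    (hne : ∀ b, b < n → b ≠ i → g' b = g b) (hv : g' i = v) :
    ((List.range n).map g).set i v = (List.range n).map g' := by
  apply List.ext_getElem
  · simp
  · intro j h1 h2
    have hjn : j < n := by simpa using h2
    rw [List.getElem_set, List.getElem_map, List.getElem_range, List.getElem_map,
      List.getElem_range]
    by_cases hj : i = j
    · subst hj; rw [if_pos rfl, hv]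
    · rw [if_neg hj, hne j hjn (fun hh => hj hh.symm)]

lemma pvGetD_set {α : Type} (l : List α) (i j : Nat) (v d : α) (hj : j < l.length) :
    (l.set i v).getD j d = if i = j then v else l.getD j d := by
  rw [List.getD_eq_getElem _ _ (by simpa using hj), List.getElem_set]
  split_ifs with h
  · rfl
  · rw [List.getD_eq_getElem _ _ hj]

-- pvPref / pvLastOcc / pvOcc structure
lemma pvPref_succ (bs : List Nat) (k b : Nat) :
    pvPref bs (k + 1) b = pvPref bs k b ++ (if bs.getD k 26 = b then [k] else []) := by
  unfold pvPref
  rw [List.range_succ, List.filter_append]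
  congr 1
  split_ifs with h
  · rw [List.filter_cons, if_pos (decide_eq_true h), List.filter_nil]
  · rw [List.filter_cons, if_neg (by simp only [decide_eq_true_eq]; exact h), List.filter_nil]

lemma pvLastOcc_zero (bs : List Nat) (b : Nat) : pvLastOcc bs 0 b = none := by
  simp [pvLastOcc, pvPref]

lemma pvLastOcc_succ (bs : List Nat) (k b : Nat) :
    pvLastOcc bs (k + 1) b = if bs.getD k 26 = b then some k else pvLastOcc bs k b := by
  unfold pvLastOcc
  rw [pvPref_succ]
  split_ifs with h
  · exact List.getLast?_concat
  · simp

lemma pvLastOcc_lt (bs : List Nat) (k b j : Nat) (h : pvLastOcc bs k b = some j) : j < k := by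
  have hm := List.mem_of_getLast? h
  simp only [pvPref, List.mem_filter, List.mem_range] at hm
  exact hm.1

lemma pvOcc_mem (bs : List Nat) (k b j : Nat) :
    j ∈ pvOcc bs k b ↔ k ≤ j ∧ j < bs.length ∧ bs.getD j 26 = b := by
  simp only [pvOcc, List.mem_filter, List.mem_range'_1, decide_eq_true_eq]
  constructor
  · rintro ⟨⟨h1, h2⟩, h3⟩; exact ⟨h1, by omega, h3⟩
  · rintro ⟨h1, h2, h3⟩; exact ⟨⟨h1, by omega⟩, h3⟩

lemma pvOcc_succ_eq (bs : List Nat) (k b : Nat) (hk : k < bs.length)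
    (h : ¬ bs.getD k 26 = b) : pvOcc bs k b = pvOcc bs (k + 1) b := by
  unfold pvOcc
  rw [show bs.length - k = (bs.length - (k + 1)) + 1 by omega, List.range'_succ,
    List.filter_cons, if_neg (by simp only [decide_eq_true_eq]; exact h)]

lemma pvOcc_succ_cons (bs : List Nat) (k b : Nat) (hk : k < bs.length)
    (h : bs.getD k 26 = b) : pvOcc bs k b = k :: pvOcc bs (k + 1) b := by
  unfold pvOcc
  rw [show bs.length - k = (bs.length - (k + 1)) + 1 by omega, List.range'_succ,
    List.filter_cons, if_pos (decide_eq_true h)]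

lemma pvPref_full (bs : List Nat) (b : Nat) : pvPref bs bs.length b = pvOcc bs 0 b := by
  unfold pvPref pvOcc
  rw [List.range_eq_range', Nat.sub_zero]

-- pvFdp recursion
lemma pvFdpL_length (bs : List Nat) (k : Nat) : (pvFdpL bs k).length = k := by
  induction k with
  | zero => rfl
  | succ m ih => simp [pvFdpL, ih]

lemma pvFdpL_succ (bs : List Nat) (k : Nat) :
    pvFdpL bs (k + 1) = pvFdpL bs k ++
      [if k = 0 then (0 : Int) else
        (pvLastOcc bs k (bs.getD k 26)).elim ((pvFdpL bs k).getD (k - 1) 0 + 1)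
          (fun j => min ((pvFdpL bs k).getD (k - 1) 0 + 1) ((pvFdpL bs k).getD j 0))] := rfl

lemma pvGetD_concat {α : Type} (l : List α) (a d : α) : (l ++ [a]).getD l.length d = a := by
  induction l with
  | nil => rfl
  | cons x xs ih => simpa using ih

lemma pvFdpL_getD_mono (bs : List Nat) (j m : Nat) (hj : j < m) (m' : Nat) :
    m ≤ m' → (pvFdpL bs m').getD j 0 = (pvFdpL bs m).getD j 0 := by
  induction m' with
  | zero => intro h; exfalso; omega
  | succ n ih =>
    intro h
    by_cases hm : m = n + 1
    · rw [hm]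
    · have h' : m ≤ n := by omega
      rw [pvFdpL_succ bs n,
        List.getD_eq_getElem _ _ (by simp [pvFdpL_length]; omega),
        List.getElem_append_left (by rw [pvFdpL_length]; omega),
        ← List.getD_eq_getElem _ _ (by rw [pvFdpL_length]; omega)]
      exact ih h'

lemma pvFdp_eq_getD (bs : List Nat) (j m : Nat) (h : j < m) :
    (pvFdpL bs m).getD j 0 = pvFdp bs j :=
  pvFdpL_getD_mono bs j (j + 1) (Nat.lt_succ_self j) m h

lemma pvFdp_zero (bs : List Nat) : pvFdp bs 0 = 0 := rfl

lemma pvFdp_succ (bs : List Nat) (m : Nat) :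
    pvFdp bs (m + 1) = (pvLastOcc bs (m + 1) (bs.getD (m + 1) 26)).elim
      (pvFdp bs m + 1) (fun j => min (pvFdp bs m + 1) (pvFdp bs j)) := by
  have hcat := pvGetD_concat (pvFdpL bs (m + 1))
    (if m + 1 = 0 then (0 : Int) else
      (pvLastOcc bs (m + 1) (bs.getD (m + 1) 26)).elim
        ((pvFdpL bs (m + 1)).getD (m + 1 - 1) 0 + 1)
        (fun j => min ((pvFdpL bs (m + 1)).getD (m + 1 - 1) 0 + 1)
          ((pvFdpL bs (m + 1)).getD j 0))) 0
  rw [pvFdpL_length] at hcat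
  rw [pvFdp, pvFdpL_succ bs (m + 1), hcat, if_neg (Nat.succ_ne_zero m)]
  simp only [Nat.add_sub_cancel]
  cases he : pvLastOcc bs (m + 1) (bs.getD (m + 1) 26) with
  | none =>
    simp only [Option.elim_none]
    rw [pvFdp_eq_getD bs m (m + 1) (by omega)]
  | some j =>
    have hjlt := pvLastOcc_lt bs (m + 1) _ j he
    simp only [Option.elim_some]
    rw [pvFdp_eq_getD bs m (m + 1) (by omega), pvFdp_eq_getD bs j (m + 1) hjlt]

lemma pvFdp_le (bs : List Nat) (k : Nat) : pvFdp bs k ≤ (k : Int) := by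
  induction k with
  | zero => rw [pvFdp_zero]; omega
  | succ m ih =>
    rw [pvFdp_succ]
    cases he : pvLastOcc bs (m + 1) (bs.getD (m + 1) 26) with
    | none => simp only [Option.elim_none]; push_cast; omega
    | some j =>
      simp only [Option.elim_some]
      have := min_le_left (pvFdp bs m + 1) (pvFdp bs j)
      push_cast; omega

-- the streamed value of B equals the dp value
lemma pvCur_none (bs : List Nat) (m : Nat)
    (he : pvLastOcc bs m (bs.getD m 26) = none) :
    (if m = 0 then (0 : Int) else pvFdp bs (m - 1) + 1) = pvFdp bs m := by
  cases m with
  | zero => simp [pvFdp_zero]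
  | succ s =>
    rw [if_neg (Nat.succ_ne_zero s), Nat.add_sub_cancel, pvFdp_succ, he, Option.elim_none]

lemma pvCur_some (bs : List Nat) (m j : Nat)
    (he : pvLastOcc bs m (bs.getD m 26) = some j) :
    (if pvFdp bs j < (if m = 0 then (0 : Int) else pvFdp bs (m - 1) + 1) then pvFdp bs j
      else (if m = 0 then (0 : Int) else pvFdp bs (m - 1) + 1)) = pvFdp bs m := by
  cases m with
  | zero => rw [pvLastOcc_zero] at he; exact absurd he (by simp)
  | succ s =>
    rw [if_neg (Nat.succ_ne_zero s), Nat.add_sub_cancel]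
    rw [pvFdp_succ, he, Option.elim_some]
    split_ifs with h <;> omega

-- pvDpVal facts
lemma pvDpVal_lt (bs : List Nat) (k j : Nat) (h : j < k) : pvDpVal bs k j = pvFdp bs j := by
  simp [pvDpVal, h]

lemma pvDpVal_zero (bs : List Nat) (j : Nat) : pvDpVal bs 0 j = (j : Int) := by
  simp [pvDpVal, pvLastOcc_zero]

lemma pvDpVal_min (bs : List Nat) (m : Nat) (hm : m + 1 < bs.length) :
    min (pvDpVal bs (m + 1) (m + 1)) (pvFdp bs m + 1) = pvFdp bs (m + 1) := by
  unfold pvDpVal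
  rw [if_neg (by omega)]
  have hh : (pvOcc bs (m + 1) (bs.getD (m + 1) 26)).head? = some (m + 1) := by
    rw [pvOcc_succ_cons bs (m + 1) _ hm rfl]; rfl
  cases he : pvLastOcc bs (m + 1) (bs.getD (m + 1) 26) with
  | none =>
    rw [pvFdp_succ, he]
    simp only [Option.elim_none]
    have := pvFdp_le bs m
    push_cast; omega
  | some j =>
    simp only [Option.elim_some]
    rw [hh, if_pos rfl, pvFdp_succ, he]
    simp only [Option.elim_some]
    exact min_comm _ _

lemma pvDpVal_stable (bs : List Nat) (k j : Nat) (hkj : k < j) (hj : j < bs.length)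
    (hne : ¬ bs.getD j 26 = bs.getD k 26) : pvDpVal bs (k + 1) j = pvDpVal bs k j := by
  unfold pvDpVal
  rw [if_neg (by omega), if_neg (by omega)]
  rw [pvLastOcc_succ, if_neg (fun hh => hne hh.symm)]
  rw [← pvOcc_succ_eq bs k _ (by omega) (fun hh => hne hh.symm)]

lemma pvDpVal_far (bs : List Nat) (k j : Nat) (hkj : k < j) (hj : j < bs.length)
    (heq : bs.getD j 26 = bs.getD k 26) : pvDpVal bs k j = (j : Int) := by
  unfold pvDpVal
  rw [if_neg (by omega)]
  have hocc : (pvOcc bs k (bs.getD j 26)).head? = some k := by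
    rw [heq, pvOcc_succ_cons bs k _ (by omega) rfl]; rfl
  cases he : pvLastOcc bs k (bs.getD j 26) with
  | none => rw [Option.elim_none]
  | some j' =>
    rw [Option.elim_some, hocc, if_neg (by intro hh; injection hh with hh; omega)]

lemma pvDpVal_pi (bs : List Nat) (k p : Nat) (hkp : k < p) (hp : p < bs.length)
    (heq : bs.getD p 26 = bs.getD k 26)
    (hhead : (pvOcc bs (k + 1) (bs.getD k 26)).head? = some p) :
    pvDpVal bs (k + 1) p = pvFdp bs k := by
  unfold pvDpVal
  rw [if_neg (by omega), heq, pvLastOcc_succ, if_pos rfl, Option.elim_some, hhead, if_pos rfl]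

lemma pvDpVal_after (bs : List Nat) (k j p : Nat) (hkj : k < j) (hj : j < bs.length)
    (heq : bs.getD j 26 = bs.getD k 26) (hne : j ≠ p)
    (hhead : (pvOcc bs (k + 1) (bs.getD k 26)).head? = some p) :
    pvDpVal bs (k + 1) j = (j : Int) := by
  unfold pvDpVal
  rw [if_neg (by omega), heq, pvLastOcc_succ, if_pos rfl, Option.elim_some, hhead,
    if_neg (by intro hh; injection hh with hh; exact hne hh.symm)]

-- extracting the first character of words[m]
lemma pvChar_plain (words : List String) (hPre : Pre_compress_shiritori words) (m : Nat)
    (hm : m < words.length) :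
    (PySem.Str.pyGet? (words.getD m "") 0).getD 'a' = pvFC words m := by
  obtain ⟨hne, -, -⟩ := pvPre_facts words hPre m hm
  show (PySem.Str.pyGet? (words.getD m "") 0).getD 'a' = (words.getD m "").toList.headD 'A'
  generalize (words.getD m "") = w at hne ⊢
  cases hcl : w.toList with
  | nil => exact absurd hcl hne
  | cons c t =>
    have h0 : PySem.Str.pyGet? w 0 = some c := by
      simp [pysem, hcl]
    simp [h0]
    rw [hcl, PySem.List.pyGet?_zero_cons]
    rfl

lemma pvChar_step (words : List String) (hPre : Pre_compress_shiritori words) (m : Nat)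
    (hm : m < words.length) :
    (PySem.Str.pyGet? (PySem.List.pyGetD words (m : Int) "") 0).getD 'a' = pvFC words m := by
  rw [PySem.List.pyGetD_natCast]
  exact pvChar_plain words hPre m hm

-- stage 1: building cs and the 26 occurrence queues
lemma pvStage1 (words : List String) (hPre : Pre_compress_shiritori words) (k : Nat) :
    k ≤ words.length →
    (PySem.List.pyRange 0 (k : Int) 1).foldl (pvStepA1 words)
      (List.replicate 26 ([] : List Int), ([] : List Char)) =
    ((List.range 26).map (fun b => (pvPref (words.map pvBkt) k b).map (fun j : Nat => (j : Int))),
     (List.range k).map (pvFC words)) := by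
  induction k with
  | zero =>
    intro _
    simp only [Nat.cast_zero]
    rw [PySem.List.pyRange_one_eq_nil le_rfl]
    simp [pvPref, List.map_const']
  | succ m ih =>
    intro hk
    rw [show ((m + 1 : Nat) : Int) = (m : Int) + 1 by push_cast; ring,
      PySem.List.pyRange_one_succ_right (Int.natCast_nonneg m), List.foldl_append,
      ih (by omega), List.foldl_cons, List.foldl_nil]
    obtain ⟨-, h71, h122⟩ := pvPre_facts words hPre m (by omega)
    simp only [pvStepA1]
    rw [pvChar_step words hPre m (by omega)]
    have hb0 : (words.map pvBkt).getD m 26 = ((pvFC words m).toNat - 71) % 26 :=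
      pvBs_getD words m (by omega)
    have hblt : ((pvFC words m).toNat - 71) % 26 < 26 := Nat.mod_lt _ (by omega)
    rw [pvGetD26 _ (by simp) _ h71 h122, pvSetD26 _ (by simp) _ h71 h122,
      PySem.List.getD_map_range _ _ _ _ hblt]
    refine Prod.ext ?_ ?_
    · dsimp only
      refine pvSetMapRange 26 _ _ _ _ hblt ?_ ?_
      · intro b hb hbne
        dsimp only
        rw [pvPref_succ, hb0, if_neg (fun hh => hbne hh.symm), List.append_nil]
      · dsimp only
        rw [pvPref_succ, hb0, if_pos rfl, List.map_append, List.map_cons, List.map_nil]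
    · dsimp only
      rw [List.range_succ, List.map_append, List.map_cons, List.map_nil]

-- stage 2: A's second loop maintains dp = pvDpVal and queues = pvOcc
lemma pvStage2 (words : List String) (hPre : Pre_compress_shiritori words) (k : Nat) :
    k ≤ words.length →
    (pvS2 words k).1.length = words.length ∧ (pvS2 words k).2.length = 26 ∧
    (∀ j, j < words.length →
      (pvS2 words k).1.getD j 0 = pvDpVal (words.map pvBkt) k j) ∧
    (∀ b, b < 26 → pvOcc (words.map pvBkt) k b ≠ [] →
      (pvS2 words k).2.getD b [] = (pvOcc (words.map pvBkt) k b).map (fun j : Nat => (j : Int))) := by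
  induction k with
  | zero =>
    intro _
    have h0 : pvS2 words 0 =
        (PySem.List.pySetD (PySem.List.pyRange 0 (words.length : Int) 1) 0 0,
         (List.range 26).map
           (fun b => (pvOcc (words.map pvBkt) 0 b).map (fun j : Nat => (j : Int)))) := rfl
    have hdp0 : PySem.List.pySetD (PySem.List.pyRange 0 (words.length : Int) 1) 0 0
        = (PySem.List.pyRange 0 (words.length : Int) 1).set 0 0 := by
      rw [PySem.List.pySetD_of_nonneg _ _ le_rfl]
      rfl
    rw [h0]
    refine ⟨?_, by simp, ?_, ?_⟩
    · dsimp only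
      rw [hdp0, List.length_set, PySem.List.length_pyRange_one]
      omega
    · intro j hj
      dsimp only
      rw [hdp0, pvDpVal_zero,
        pvGetD_set _ _ _ _ _ (by rw [PySem.List.length_pyRange_one]; omega),
        List.getD_eq_getElem _ _ (by rw [PySem.List.length_pyRange_one]; omega),
        PySem.List.getElem_pyRange_one]
      split_ifs with h <;> omega
    · intro b hb _
      dsimp only
      rw [PySem.List.getD_map_range _ _ _ _ hb]
  | succ m ih =>
    intro hk
    obtain ⟨hL1, hL2, hdp, hq⟩ := ih (by omega)
    have hmN : m < words.length := by omega
    have hbsL : (words.map pvBkt).length = words.length := by simp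
    obtain ⟨-, h71, h122⟩ := pvPre_facts words hPre m hmN
    have hb0 : (words.map pvBkt).getD m 26 = ((pvFC words m).toNat - 71) % 26 :=
      pvBs_getD words m hmN
    have hblt : ((pvFC words m).toNat - 71) % 26 < 26 := Nat.mod_lt _ (by omega)
    have hstep : pvS2 words (m + 1) =
        pvStepA2 ((List.range words.length).map (pvFC words)) (pvS2 words m) (m : Int) := by
      unfold pvS2
      rw [show ((m + 1 : Nat) : Int) = (m : Int) + 1 by push_cast; ring,
        PySem.List.pyRange_one_succ_right (Int.natCast_nonneg m), List.foldl_append,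
        List.foldl_cons, List.foldl_nil]
    have hcs : PySem.List.pyGetD ((List.range words.length).map (pvFC words)) (m : Int) 'a'
        = pvFC words m := by
      rw [PySem.List.pyGetD_natCast, PySem.List.getD_map_range _ _ _ _ hmN]
    -- the dp array after the min-update holds pvFdp at slot m
    have hdp' :
        (if 0 < (m : Int) then
          PySem.List.pySetD (pvS2 words m).1 (m : Int)
            (min (PySem.List.pyGetD (pvS2 words m).1 (m : Int) 0)
              (PySem.List.pyGetD (pvS2 words m).1 ((m : Int) - 1) 0 + 1))
        else (pvS2 words m).1).length = words.length ∧
        (∀ j, j < words.length →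
          (if 0 < (m : Int) then
            PySem.List.pySetD (pvS2 words m).1 (m : Int)
              (min (PySem.List.pyGetD (pvS2 words m).1 (m : Int) 0)
                (PySem.List.pyGetD (pvS2 words m).1 ((m : Int) - 1) 0 + 1))
          else (pvS2 words m).1).getD j 0
            = if j = m then pvFdp (words.map pvBkt) m else pvDpVal (words.map pvBkt) m j) := by
      cases m with
      | zero =>
        rw [if_neg (by omega)]
        refine ⟨hL1, ?_⟩
        intro j hj
        rw [hdp j hj]
        by_cases h : j = 0
        · subst h
          rw [if_pos rfl, pvDpVal_zero, pvFdp_zero]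
          simp
        · rw [if_neg h]
      | succ s =>
        rw [if_pos (by omega)]
        have hget1 : PySem.List.pyGetD (pvS2 words (s + 1)).1 ((s + 1 : Nat) : Int) 0
            = pvDpVal (words.map pvBkt) (s + 1) (s + 1) := by
          rw [PySem.List.pyGetD_natCast]; exact hdp (s + 1) hmN
        have hget2 : PySem.List.pyGetD (pvS2 words (s + 1)).1 (((s + 1 : Nat) : Int) - 1) 0
            = pvFdp (words.map pvBkt) s := by
          rw [show (((s + 1 : Nat) : Int) - 1) = ((s : Nat) : Int) by push_cast; ring,
            PySem.List.pyGetD_natCast, hdp s (by omega),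
            pvDpVal_lt _ (s + 1) s (by omega)]
        rw [hget1, hget2, PySem.List.pySetD_natCast,
          pvDpVal_min _ s (by rw [hbsL]; omega)]
        refine ⟨by rw [List.length_set]; exact hL1, ?_⟩
        intro j hj
        rw [pvGetD_set _ _ _ _ _ (by rw [hL1]; exact hj)]
        by_cases h1 : s + 1 = j
        · rw [if_pos h1, if_pos h1.symm]
        · rw [if_neg h1, if_neg (fun hh => h1 hh.symm), hdp j hj]
    -- the queue of the bucket of word m
    have hq0 : PySem.List.pyGetD (pvS2 words m).2 (((pvFC words m).toNat : Int) - 97) []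
        = (m : Int) :: (pvOcc (words.map pvBkt) (m + 1)
            (((pvFC words m).toNat - 71) % 26)).map (fun j : Nat => (j : Int)) := by
      rw [pvGetD26 _ hL2 _ h71 h122]
      have hcons : pvOcc (words.map pvBkt) m (((pvFC words m).toNat - 71) % 26)
          = m :: pvOcc (words.map pvBkt) (m + 1) (((pvFC words m).toNat - 71) % 26) :=
        pvOcc_succ_cons _ m _ (by omega) hb0
      rw [hq _ hblt (by rw [hcons]; simp), hcons, List.map_cons]
    rw [hstep]
    simp only [pvStepA2, hcs, hq0, List.tail_cons]
    cases hocc : pvOcc (words.map pvBkt) (m + 1) (((pvFC words m).toNat - 71) % 26) with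
    | nil =>
      simp only [List.map_nil, List.length_cons, List.length_nil]
      rw [if_pos (by omega)]
      dsimp only
      refine ⟨hdp'.1, hL2, ?_, ?_⟩
      · intro j hj
        rw [hdp'.2 j hj]
        rcases Nat.lt_trichotomy j m with h | h | h
        · rw [if_neg (by omega), pvDpVal_lt _ m j h, pvDpVal_lt _ (m + 1) j (by omega)]
        · subst h
          rw [if_pos rfl, pvDpVal_lt _ (j + 1) j (by omega)]
        · rw [if_neg (by omega)]
          have hne : ¬ (words.map pvBkt).getD j 26 = (words.map pvBkt).getD m 26 := by
            intro heq
            have hmem : j ∈ pvOcc (words.map pvBkt) (m + 1) (((pvFC words m).toNat - 71) % 26) := by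
              rw [pvOcc_mem]
              exact ⟨by omega, by omega, by rw [heq]; exact hb0⟩
            rw [hocc] at hmem
            simp at hmem
          exact (pvDpVal_stable _ m j h (by omega) hne).symm
      · intro b hb hbne
        by_cases hbb : b = ((pvFC words m).toNat - 71) % 26
        · subst hbb
          exact absurd hocc hbne
        · have hswap : pvOcc (words.map pvBkt) m b = pvOcc (words.map pvBkt) (m + 1) b :=
            pvOcc_succ_eq _ m b (by omega) (by rw [hb0]; exact fun hh => hbb hh.symm)
          rw [← hswap]
          exact hq b hb (by rw [hswap]; exact hbne)
    | cons p rest =>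
      simp only [List.map_cons, List.length_cons, List.length_map]
      rw [if_neg (by omega)]
      dsimp only
      have hpmem : p ∈ pvOcc (words.map pvBkt) (m + 1) (((pvFC words m).toNat - 71) % 26) := by
        rw [hocc]; simp
      rw [pvOcc_mem] at hpmem
      obtain ⟨hp1, hp2, hp3⟩ := hpmem
      have hhead : (pvOcc (words.map pvBkt) (m + 1) ((words.map pvBkt).getD m 26)).head?
          = some p := by
        rw [hb0, hocc]; rfl
      have hgetm : PySem.List.pyGetD
          (if 0 < (m : Int) then
            PySem.List.pySetD (pvS2 words m).1 (m : Int)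
              (min (PySem.List.pyGetD (pvS2 words m).1 (m : Int) 0)
                (PySem.List.pyGetD (pvS2 words m).1 ((m : Int) - 1) 0 + 1))
          else (pvS2 words m).1) (m : Int) 0 = pvFdp (words.map pvBkt) m := by
        rw [PySem.List.pyGetD_natCast, hdp'.2 m hmN, if_pos rfl]
      rw [hgetm, PySem.List.pyGetD_zero_cons, PySem.List.pySetD_natCast,
        pvSetD26 _ hL2 _ h71 h122]
      refine ⟨by rw [List.length_set]; exact hdp'.1, by rw [List.length_set]; exact hL2,
        ?_, ?_⟩
      · intro j hj
        rw [pvGetD_set _ _ _ _ _ (by rw [hdp'.1]; exact hj)]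
        by_cases hpj : p = j
        · subst hpj
          rw [if_pos rfl]
          exact (pvDpVal_pi _ m p (by omega) (by omega)
            (by rw [hb0]; exact hp3) hhead).symm
        · rw [if_neg hpj, hdp'.2 j hj]
          rcases Nat.lt_trichotomy j m with h | h | h
          · rw [if_neg (by omega), pvDpVal_lt _ m j h, pvDpVal_lt _ (m + 1) j (by omega)]
          · subst h
            rw [if_pos rfl, pvDpVal_lt _ (j + 1) j (by omega)]
          · rw [if_neg (by omega)]
            by_cases heqb : (words.map pvBkt).getD j 26 = (words.map pvBkt).getD m 26
            · rw [pvDpVal_far _ m j h (by omega) heqb,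
                pvDpVal_after _ m j p h (by omega) heqb (fun hh => hpj hh.symm) hhead]
            · exact (pvDpVal_stable _ m j h (by omega) heqb).symm
      · intro b hb hbne
        rw [pvGetD_set _ _ _ _ _ (by rw [hL2]; exact hb)]
        by_cases hbb : ((pvFC words m).toNat - 71) % 26 = b
        · rw [if_pos hbb, ← hbb, hocc]
          rfl
        · rw [if_neg hbb]
          have hswap : pvOcc (words.map pvBkt) m b = pvOcc (words.map pvBkt) (m + 1) b :=
            pvOcc_succ_eq _ m b (by omega) (by rw [hb0]; exact hbb)
          rw [← hswap]
          exact hq b hb (by rw [hswap]; exact hbne)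

theorem pvPortA (words : List String) (hPre : Pre_compress_shiritori words) :
    compress_shiritori words = pvFdp (words.map pvBkt) (words.length - 1) + 1 := by
  have hN : 0 < words.length := List.length_pos_iff.mpr hPre.1
  simp only [compress_shiritori, PySem.List.len_eq]
  rw [pvStage1 words hPre words.length le_rfl]
  have hocc0 : (fun b => (pvPref (words.map pvBkt) words.length b).map (fun j : Nat => (j : Int)))
      = (fun b => (pvOcc (words.map pvBkt) 0 b).map (fun j : Nat => (j : Int))) := by
    funext b
    rw [show words.length = (words.map pvBkt).length from (List.length_map _).symm,
      pvPref_full]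
  rw [hocc0]
  show PySem.List.pyGetD (pvS2 words words.length).1 (-1) 0 + 1 = _
  obtain ⟨hL1, -, hdp, -⟩ := pvStage2 words hPre words.length le_rfl
  have hnil : (pvS2 words words.length).1 ≠ [] := by
    intro hh
    rw [hh] at hL1
    simp at hL1
    omega
  rw [PySem.List.pyGetD_neg_one _ _ hnil, List.getLast_eq_getElem]
  have hj := hdp (words.length - 1) (by omega)
  rw [List.getD_eq_getElem _ _ (by rw [hL1]; omega)] at hj
  simp only [hL1]
  rw [hj, pvDpVal_lt _ words.length (words.length - 1) (by omega)]

-- stage for B: the streaming fold over the first k words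
lemma pvStageB (words : List String) (hPre : Pre_compress_shiritori words) (k : Nat) :
    k ≤ words.length →
    (PySem.List.enumerate (words.take k)).foldl pvStepB
      (List.replicate 26 (none : Option Int), (0 : Int)) =
    ((List.range 26).map
      (fun b => (pvLastOcc (words.map pvBkt) k b).map (pvFdp (words.map pvBkt))),
     if k = 0 then 0 else pvFdp (words.map pvBkt) (k - 1)) := by
  induction k with
  | zero =>
    intro _
    simp [PySem.List.enumerate_nil, pvLastOcc_zero, List.map_const']
  | succ m ih =>
    intro hk
    have hmN : m < words.length := by omega
    obtain ⟨hnc, h71, h122⟩ := pvPre_facts words hPre m hmN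
    have htake : words.take (m + 1) = words.take m ++ [words.getD m ""] := by
      rw [List.take_add_one, List.getElem?_eq_getElem hmN, List.getD_eq_getElem _ _ hmN]
      rfl
    rw [htake, PySem.List.enumerate_append, List.foldl_append, ih (by omega),
      List.length_take, Nat.min_eq_left (by omega)]
    rw [show ((0 : Int) + (m : Nat)) = ((m : Nat) : Int) by ring,
      show PySem.List.enumerate [words.getD m ""] ((m : Nat) : Int)
        = [(((m : Nat) : Int), words.getD m "")] from rfl,
      List.foldl_cons, List.foldl_nil]
    simp only [pvStepB]
    rw [pvChar_plain words hPre m hmN]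
    have hb0 : (words.map pvBkt).getD m 26 = ((pvFC words m).toNat - 71) % 26 :=
      pvBs_getD words m hmN
    have hblt : ((pvFC words m).toNat - 71) % 26 < 26 := Nat.mod_lt _ (by omega)
    rw [pvGetD26 _ (by simp) _ h71 h122, PySem.List.getD_map_range _ _ _ _ hblt]
    have hcur0 : (if ((m : Nat) : Int) ≠ 0 then
        (if m = 0 then (0 : Int) else pvFdp (words.map pvBkt) (m - 1)) + 1 else 0)
        = (if m = 0 then (0 : Int) else pvFdp (words.map pvBkt) (m - 1) + 1) := by
      by_cases h : m = 0
      · subst h; simp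
      · rw [if_pos (by omega), if_neg h, if_neg h]
    rw [hcur0, ← hb0]
    have hcur : ((pvLastOcc (words.map pvBkt) m ((words.map pvBkt).getD m 26)).map
          (pvFdp (words.map pvBkt))).elim
        (if m = 0 then (0 : Int) else pvFdp (words.map pvBkt) (m - 1) + 1)
        (fun l => if l < (if m = 0 then (0 : Int) else pvFdp (words.map pvBkt) (m - 1) + 1)
          then l else (if m = 0 then (0 : Int) else pvFdp (words.map pvBkt) (m - 1) + 1))
        = pvFdp (words.map pvBkt) m := by
      cases he : pvLastOcc (words.map pvBkt) m ((words.map pvBkt).getD m 26) with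
      | none =>
        simp only [Option.map_none, Option.elim_none]
        exact pvCur_none _ m he
      | some j =>
        simp only [Option.map_some, Option.elim_some]
        exact pvCur_some _ m j he
    rw [hcur]
    refine Prod.ext ?_ ?_
    · dsimp only
      rw [pvSetD26 _ (by simp) _ h71 h122]
      refine pvSetMapRange 26 _ _ _ _ hblt ?_ ?_
      · intro b hb hbne
        dsimp only
        rw [pvLastOcc_succ, hb0, if_neg (fun hh => hbne hh.symm)]
      · dsimp only
        rw [pvLastOcc_succ, hb0, if_pos rfl, Option.map_some]
    · dsimp only
      rw [if_neg (Nat.succ_ne_zero m), Nat.add_sub_cancel]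

theorem pvPortB (words : List String) (hPre : Pre_compress_shiritori words) :
    compress_shiritori_alt words = pvFdp (words.map pvBkt) (words.length - 1) + 1 := by
  have hN : 0 < words.length := List.length_pos_iff.mpr hPre.1
  simp only [compress_shiritori_alt]
  have h := pvStageB words hPre words.length le_rfl
  rw [List.take_length] at h
  rw [h]
  dsimp only
  rw [if_neg (by omega)]

-- ===== VERDICT (by name: the statement is the Claim_ definition above) =====
theorem compress_shiritori_spec : Claim_equal_compress_shiritori := by
  intro words _ hPre
  unfold Spec_compress_shiritori
  rw [pvPortA words hPre, pvPortB words hPre]
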